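-- pv_equiv track=rewrite | github.com/vitacore-dev/Email-Intelligence-System | email-search-backend/src/services/publication_analyzer.py | _deduplicate_publications
-- ===== SOURCE A (Python) =====
-- from typing import Dict, List, Any, Optional, Tuple
--
-- def _deduplicate_publications(publications: List[Dict[str, Any]]) -> List[Dict[str, Any]]:
--     """Дедупликация публикаций по DOI и названию"""
--     seen_dois = set()
--     seen_titles = set()
--     unique_publications = []
--
--     for pub in publications:
--         doi = pub.get('doi', '').strip()
--         title = pub.get('title', '').strip().lower()
--
--         # Проверяем дедупликацию по DOI
--         if doi and doi not in seen_dois: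
--             seen_dois.add(doi)
--             unique_publications.append(pub)
--         # Проверяем дедупликацию по названию
--         elif title and title not in seen_titles and not doi:
--             seen_titles.add(title)
--             unique_publications.append(pub)
--
--     return unique_publications
-- ===== SOURCE B (Python) =====
-- def _deduplicate_publications(publications):
--     def _key(pub):
--         doi = pub.get('doi', '').strip()
--         if doi:
--             return ('doi', doi)
--         title = pub.get('title', '').strip().lower()
--         if title:
--             return ('title', title)
--         return None
--
--     result = []
--     remaining = list(publications)
--     while remaining:
--         head = remaining[0]
--         rest = remaining[1:]
--         k = _key(head)
--         if k is None:
--             remaining = rest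
--         else:
--             result.append(head)
--             remaining = [p for p in rest if _key(p) != k]
--     return result
-- ===== Notes on version B (the rewrite author's own statement) =====
-- stated objective: alternative
-- what changed: Replaces the seen-sets single pass with an iterative nub: repeatedly emit the first remaining publication with a non-empty key and filter every later publication with the same key out of the remaining list, so no seen set is maintained at all.
import Mathlib
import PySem

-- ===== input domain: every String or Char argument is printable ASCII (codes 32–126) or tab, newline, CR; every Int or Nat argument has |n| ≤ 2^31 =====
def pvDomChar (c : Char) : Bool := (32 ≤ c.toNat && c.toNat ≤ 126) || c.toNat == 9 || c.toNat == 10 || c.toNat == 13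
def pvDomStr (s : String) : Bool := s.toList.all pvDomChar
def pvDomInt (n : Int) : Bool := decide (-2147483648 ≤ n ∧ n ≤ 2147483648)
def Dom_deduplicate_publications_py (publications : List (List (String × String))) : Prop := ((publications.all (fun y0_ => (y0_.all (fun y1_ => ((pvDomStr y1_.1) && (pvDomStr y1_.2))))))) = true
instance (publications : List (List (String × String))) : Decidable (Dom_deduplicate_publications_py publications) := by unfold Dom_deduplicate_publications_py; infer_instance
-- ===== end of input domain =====

-- B deduplicates by iterated filtering (an iterative "nub": emit the first keyed publication,
-- drop every later one with the same key from the remaining list) instead of A's seen-sets pass;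
-- objective: alternative. Equivalence proved over the whole domain.

-- shared primitive: pub.get(k, '') on the association-list encoding of a dict (first match)
def pvDictGet (pub : List (String × String)) (k : String) : String :=
  (PySem.Dict.mk pub).getD k ""

-- ===== PORT A =====
-- loop body of A: state = (seen_dois, seen_titles, unique_publications)
def dedupA_step (s : PySem.Set String × PySem.Set String × List (List (String × String)))
    (pub : List (String × String)) :
    PySem.Set String × PySem.Set String × List (List (String × String)) :=
  let doi := PySem.Str.strip (pvDictGet pub "doi")
  let title := PySem.Str.lower (PySem.Str.strip (pvDictGet pub "title"))
  if doi ≠ "" ∧ ¬ s.1.contains doi then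
    (s.1.add doi, s.2.1, s.2.2 ++ [pub])
  else if title ≠ "" ∧ ¬ s.2.1.contains title ∧ doi = "" then
    (s.1, s.2.1.add title, s.2.2 ++ [pub])
  else s

def deduplicate_publications_py (publications : List (List (String × String))) : List (List (String × String)) :=
  (publications.foldl dedupA_step (PySem.Set.empty, PySem.Set.empty, [])).2.2

-- ===== PORT B =====
-- Source B's _key: tagged canonical key, or none
def pvKey (pub : List (String × String)) : Option (String × String) :=
  let doi := PySem.Str.strip (pvDictGet pub "doi")
  if doi ≠ "" then some ("doi", doi)
  else
    let title := PySem.Str.lower (PySem.Str.strip (pvDictGet pub "title"))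
    if title ≠ "" then some ("title", title) else none

-- Source B's while loop: state = (result, remaining); emits head, filters its key out of the rest
def dedupB_go (result : List (List (String × String))) (remaining : List (List (String × String))) :
    List (List (String × String)) :=
  match remaining with
  | [] => result
  | head :: rest =>
    match pvKey head with
    | none => dedupB_go result rest
    | some k => dedupB_go (result ++ [head]) (rest.filter (fun p => pvKey p ≠ some k))
termination_by remaining.length
decreasing_by
  · simp
  · simpa using Nat.lt_succ_of_le (le_trans (List.length_filter_le _ _) (Nat.le_of_eq List.length_attach))

def deduplicate_publications_py_alt (publications : List (List (String × String))) : List (List (String × String)) :=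
  dedupB_go [] publications

-- ===== PRECONDITION & SPEC =====
def Spec_deduplicate_publications_py (publications : List (List (String × String))) (out : List (List (String × String))) : Prop := out = deduplicate_publications_py_alt publications
instance (publications : List (List (String × String))) (out : List (List (String × String))) : Decidable (Spec_deduplicate_publications_py publications out) := by unfold Spec_deduplicate_publications_py; infer_instance

-- ===== CLAIM =====
def Claim_equal_deduplicate_publications_py : Prop := ∀ (publications : List (List (String × String))), Dom_deduplicate_publications_py publications → Spec_deduplicate_publications_py publications (deduplicate_publications_py publications)

-- ===== LEMMAS AND PROOFS =====

-- proof-only intermediate: A's pass re-expressed with one plain list of tagged keys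
def dedupK_step (s : List (String × String) × List (List (String × String)))
    (pub : List (String × String)) :
    List (String × String) × List (List (String × String)) :=
  match pvKey pub with
  | none => s
  | some k => if k ∈ s.1 then s else (s.1 ++ [k], s.2 ++ [pub])

-- Stage 1: A's two-set fold equals the tagged-key-list fold
lemma loop_eq (pubs : List (List (String × String)))
    (D T : PySem.Set String) (S : List (String × String))
    (acc : List (List (String × String)))
    (hD : ∀ d : String, ("doi", d) ∈ S ↔ d ∈ D)
    (hT : ∀ t : String, ("title", t) ∈ S ↔ t ∈ T) :
    (pubs.foldl dedupA_step (D, T, acc)).2.2 = (pubs.foldl dedupK_step (S, acc)).2 := by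
  induction pubs generalizing D T S acc with
  | nil => rfl
  | cons pub rest ih =>
    simp only [List.foldl_cons]
    set doi := PySem.Str.strip (pvDictGet pub "doi") with hdoi
    set title := PySem.Str.lower (PySem.Str.strip (pvDictGet pub "title")) with htitle
    by_cases h1 : doi = ""
    · by_cases h2 : title = ""
      · have hA : dedupA_step (D, T, acc) pub = (D, T, acc) := by
          simp [dedupA_step, ← hdoi, ← htitle, h1, h2]
        have hB : dedupK_step (S, acc) pub = (S, acc) := by
          simp [dedupK_step, pvKey, ← hdoi, ← htitle, h1, h2]
        rw [hA, hB]; exact ih D T S acc hD hT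
      · have hkey : pvKey pub = some ("title", title) := by
          simp [pvKey, ← hdoi, ← htitle, h1, h2]
        by_cases h3 : title ∈ T
        · have hA : dedupA_step (D, T, acc) pub = (D, T, acc) := by
            simp [dedupA_step, ← hdoi, ← htitle, h1, h3]
          have hB : dedupK_step (S, acc) pub = (S, acc) := by
            simp [dedupK_step, hkey, (hT title).mpr h3]
          rw [hA, hB]; exact ih D T S acc hD hT
        · have hA : dedupA_step (D, T, acc) pub = (D, T.add title, acc ++ [pub]) := by
            simp [dedupA_step, ← hdoi, ← htitle, h1, h2, h3]
          have hnS : ("title", title) ∉ S := fun h => h3 ((hT title).mp h)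
          have hB : dedupK_step (S, acc) pub = (S ++ [("title", title)], acc ++ [pub]) := by
            simp [dedupK_step, hkey, hnS]
          rw [hA, hB]
          refine ih D (T.add title) (S ++ [("title", title)]) (acc ++ [pub]) ?_ ?_
          · intro d; simp [List.mem_append, hD d, Prod.ext_iff]
          · intro t
            rw [PySem.Set.mem_add]
            simp [List.mem_append, hT t, Prod.ext_iff]
    · have hkey : pvKey pub = some ("doi", doi) := by
        simp [pvKey, ← hdoi, h1]
      by_cases h3 : doi ∈ D
      · have hA : dedupA_step (D, T, acc) pub = (D, T, acc) := by
          simp [dedupA_step, ← hdoi, ← htitle, h1, h3]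
        have hB : dedupK_step (S, acc) pub = (S, acc) := by
          simp [dedupK_step, hkey, (hD doi).mpr h3]
        rw [hA, hB]; exact ih D T S acc hD hT
      · have hA : dedupA_step (D, T, acc) pub = (D.add doi, T, acc ++ [pub]) := by
          simp [dedupA_step, ← hdoi, h1, h3]
        have hnS : ("doi", doi) ∉ S := fun h => h3 ((hD doi).mp h)
        have hB : dedupK_step (S, acc) pub = (S ++ [("doi", doi)], acc ++ [pub]) := by
          simp [dedupK_step, hkey, hnS]
        rw [hA, hB]
        refine ih (D.add doi) T (S ++ [("doi", doi)]) (acc ++ [pub]) ?_ ?_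
        · intro d
          rw [PySem.Set.mem_add]
          simp [List.mem_append, hD d, Prod.ext_iff]
        · intro t; simp [List.mem_append, hT t, Prod.ext_iff]

-- filter predicate: "key not yet seen (or no key)"
def notSeen (S : List (String × String)) (p : List (String × String)) : Bool :=
  match pvKey p with
  | none => true
  | some k => decide (k ∉ S)

-- Stage 2: the tagged-key fold equals B's iterated-filter loop
lemma stage2 (n : Nat) : ∀ (pubs : List (List (String × String)))
    (S : List (String × String)) (acc : List (List (String × String))),
    pubs.length ≤ n →
    (pubs.foldl dedupK_step (S, acc)).2 = dedupB_go acc (pubs.filter (notSeen S)) := by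
  induction n with
  | zero =>
    intro pubs S acc hlen
    have : pubs = [] := List.length_eq_zero_iff.mp (Nat.le_zero.mp hlen)
    subst this; simp [dedupB_go]
  | succ n ih =>
    intro pubs S acc hlen
    cases pubs with
    | nil => simp [dedupB_go]
    | cons pub rest =>
      simp only [List.foldl_cons, List.filter_cons]
      cases hk : pvKey pub with
      | none =>
        have hstep : dedupK_step (S, acc) pub = (S, acc) := by simp [dedupK_step, hk]
        have hp : notSeen S pub = true := by simp [notSeen, hk]
        rw [hstep, hp]
        simp only [if_true]
        rw [show dedupB_go acc (pub :: rest.filter (notSeen S)) = dedupB_go acc (rest.filter (notSeen S)) by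
          rw [dedupB_go]; simp [hk]]
        exact ih rest S acc (Nat.le_of_succ_le_succ hlen)
      | some k =>
        by_cases hc : k ∈ S
        · have hstep : dedupK_step (S, acc) pub = (S, acc) := by simp [dedupK_step, hk, hc]
          have hp : notSeen S pub = false := by simp [notSeen, hk, hc]
          rw [hstep, hp]
          simp only [Bool.false_eq_true, if_false]
          exact ih rest S acc (Nat.le_of_succ_le_succ hlen)
        · have hstep : dedupK_step (S, acc) pub = (S ++ [k], acc ++ [pub]) := by
            simp [dedupK_step, hk, hc]
          have hp : notSeen S pub = true := by simp [notSeen, hk, hc]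
          rw [hstep, hp]
          simp only [if_true]
          rw [show dedupB_go acc (pub :: rest.filter (notSeen S))
              = dedupB_go (acc ++ [pub]) ((rest.filter (notSeen S)).filter (fun p => pvKey p ≠ some k)) by
            rw [dedupB_go]; simp [hk]]
          rw [List.filter_filter]
          have hfe : rest.filter (fun p => decide (pvKey p ≠ some k) && notSeen S p)
              = rest.filter (notSeen (S ++ [k])) := by
            apply List.filter_congr
            intro p _
            cases hpk : pvKey p with
            | none => simp [notSeen, hpk]
            | some k' => simp [notSeen, hpk, List.mem_append, not_or, And.comm]
          rw [hfe]
          exact ih rest (S ++ [k]) (acc ++ [pub]) (Nat.le_of_succ_le_succ hlen)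

-- ===== VERDICT =====
theorem deduplicate_publications_py_spec : Claim_equal_deduplicate_publications_py := by
  intro pubs _
  unfold Spec_deduplicate_publications_py deduplicate_publications_py deduplicate_publications_py_alt
  rw [loop_eq pubs PySem.Set.empty PySem.Set.empty [] []
      (fun d => by simp [PySem.Set.empty]) (fun t => by simp [PySem.Set.empty])]
  rw [stage2 pubs.length pubs [] [] (le_refl _)]
  congr 1
  rw [List.filter_eq_self]
  intro p _
  cases hpk : pvKey p <;> simp [notSeen, hpk]
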